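-- pv_equiv track=rewrite | github.com/KGebski0036/Kryptografia | Lab02-scripts/przestawieniowy/main.py | generate_numeric_key
-- ===== SOURCE A (Python) =====
-- def generate_numeric_key(key):
--     key_list = list(key)
--     key_with_index = sorted((char, i) for i, char in enumerate(key_list))
--
--     numeric_key = [0] * len(key)
--     last_char = None
--     last_num = 0
--     for i, (char, original_idx) in enumerate(key_with_index):
--         if char == last_char:
--             last_num += 1
--         else:
--             last_num = i + 1
--         numeric_key[original_idx] = last_num
--         last_char = char
--
--     return numeric_key
-- ===== SOURCE B (Python) =====
-- def generate_numeric_key(key):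
--     # counting-sort style: rank = (#chars strictly smaller) + (occurrence index
--     # among equal chars); sorts only the distinct characters, never the key itself
--     counts = {}
--     for c in key:
--         counts[c] = counts.get(c, 0) + 1
--     offset = {}
--     total = 0
--     for c in sorted(counts):
--         offset[c] = total
--         total += counts[c]
--     out = []
--     for c in key:
--         offset[c] = offset[c] + 1
--         out.append(offset[c])
--     return out
-- ===== Notes on version B (the rewrite author's own statement) =====
-- stated objective: alternative
-- what changed: B never sorts the key's (char, index) pairs and keeps no last_char/last_num state: it counts characters, sorts only the distinct characters to build prefix-sum base offsets, then emits rank = base offset + running occurrence count in one pass over the key.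
import Mathlib
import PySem

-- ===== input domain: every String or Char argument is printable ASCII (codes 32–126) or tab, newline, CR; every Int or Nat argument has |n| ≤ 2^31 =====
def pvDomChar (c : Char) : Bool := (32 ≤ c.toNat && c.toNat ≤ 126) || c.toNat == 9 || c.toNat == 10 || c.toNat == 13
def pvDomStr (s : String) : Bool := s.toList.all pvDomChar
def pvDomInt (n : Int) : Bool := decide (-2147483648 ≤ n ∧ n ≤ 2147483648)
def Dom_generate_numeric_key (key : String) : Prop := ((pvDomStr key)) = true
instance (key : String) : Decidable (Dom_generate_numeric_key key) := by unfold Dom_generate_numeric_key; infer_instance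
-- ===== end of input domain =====

-- B replaces A's sort of all (char, index) pairs by a counting-sort scheme: count each
-- character, give each distinct character a prefix-sum base offset, then emit ranks in
-- one pass over the key (a different algorithm of similar cost).

-- ===== PORT A =====
-- Literal port of A: pair each char with its index, sort the (char, index) pairs,
-- then walk the sorted list keeping (numeric_key, last_char, last_num) and write
-- last_num into the slot original_idx.
def generate_numeric_key (key : String) : List Int :=
  let key_list := key.toList
  let key_with_index := PySem.List.sorted2
    ((PySem.List.enumerate key_list).map (fun p => (p.2, p.1))) (fun t => t.1) (fun t => t.2)
  let numeric_key : List Int := PySem.List.pyRepeat [(0 : Int)] (PySem.Str.len key)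
  ((PySem.List.enumerate key_with_index).foldl
    (fun st q =>
      let last_num := if some q.2.1 = st.2.1 then st.2.2 + 1 else q.1 + 1
      (PySem.List.pySetD st.1 q.2.2 last_num, some q.2.1, last_num))
    (numeric_key, (none : Option Char), (0 : Int))).1

-- ===== PORT B =====
-- Literal port of B: count each character, give every distinct character (in sorted
-- order) a base offset = running total of smaller characters' counts, then walk the
-- key once, bumping the character's offset entry and emitting it.
-- ('offset[c] = offset[c] + 1' is ported with getD: c is always a key of offset,
-- so Python's lookup never raises.)
def generate_numeric_key_alt (key : String) : List Int :=
  let ks := key.toList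
  let counts := ks.foldl (fun d c => d.insert c (d.getD c 0 + 1))
    (PySem.Dict.empty : PySem.Dict Char Int)
  let offset0 := (PySem.List.sorted counts.keys (fun c => c)).foldl
    (fun (st : PySem.Dict Char Int × Int) c => (st.1.insert c st.2, st.2 + counts.getD c 0))
    (PySem.Dict.empty, 0)
  (ks.foldl (fun (st : PySem.Dict Char Int × List Int) c =>
      let v := st.1.getD c 0 + 1
      (st.1.insert c v, st.2 ++ [v])) (offset0.1, ([] : List Int))).2

-- ===== PRECONDITION & SPEC =====
def Spec_generate_numeric_key (key : String) (out : List Int) : Prop := out = generate_numeric_key_alt key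
instance (key : String) (out : List Int) : Decidable (Spec_generate_numeric_key key out) := by unfold Spec_generate_numeric_key; infer_instance

-- ===== CLAIM (what is proved, stated in full; the proofs are below) =====
def Claim_equal_generate_numeric_key : Prop := ∀ (key : String), Dom_generate_numeric_key key → Spec_generate_numeric_key key (generate_numeric_key key)

-- ===== LEMMAS AND PROOFS =====
-- lex order on (Char × Int)
abbrev ltp (a b : Char × Int) : Prop := a.1 < b.1 ∨ (a.1 = b.1 ∧ a.2 < b.2)

def bef (a b : Char × Int) : Bool :=
  decide (a.1 < b.1) || (!decide (b.1 < a.1) && decide (a.2 < b.2))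

theorem bef_iff (a b : Char × Int) : bef a b = true ↔ ltp a b := by
  simp only [bef, ltp, Bool.or_eq_true, Bool.and_eq_true, Bool.not_eq_true',
    decide_eq_true_eq, decide_eq_false_iff_not]
  constructor
  · rintro (h | ⟨h1, h2⟩)
    · exact Or.inl h
    · rcases lt_trichotomy a.1 b.1 with h' | h' | h'
      · exact Or.inl h'
      · exact Or.inr ⟨h', h2⟩
      · exact absurd h' h1
  · rintro (h | ⟨h1, h2⟩)
    · exact Or.inl h
    · exact Or.inr ⟨fun h' => absurd (h1 ▸ h') (lt_irrefl _), h2⟩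

theorem ltp_trans {a b c : Char × Int} (h1 : ltp a b) (h2 : ltp b c) : ltp a c := by
  rcases h1 with h1 | ⟨e1, l1⟩ <;> rcases h2 with h2 | ⟨e2, l2⟩
  · exact Or.inl (lt_trans h1 h2)
  · exact Or.inl (e2 ▸ h1)
  · exact Or.inl (e1 ▸ h2)
  · exact Or.inr ⟨e1.trans e2, lt_trans l1 l2⟩

theorem ltp_asymm {a b : Char × Int} (h : ltp a b) : ¬ ltp b a := by
  rcases h with h | ⟨e, l⟩ <;> rintro (h' | ⟨e', l'⟩)
  · exact absurd h' (lt_asymm h)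
  · exact absurd (e' ▸ h) (lt_irrefl _)
  · exact absurd (e ▸ h') (lt_irrefl _)
  · omega

theorem ltp_irrefl (a : Char × Int) : ¬ ltp a a := fun h => ltp_asymm h h

theorem ltp_trichotomy {a b : Char × Int} (hne : a ≠ b) : ltp a b ∨ ltp b a := by
  rcases lt_trichotomy a.1 b.1 with h | h | h
  · exact Or.inl (Or.inl h)
  · rcases lt_trichotomy a.2 b.2 with h' | h' | h'
    · exact Or.inl (Or.inr ⟨h, h'⟩)
    · exact absurd (Prod.ext h h') hne
    · exact Or.inr (Or.inr ⟨h.symm, h'⟩)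
  · exact Or.inr (Or.inl h)

theorem insertBy_nil' (b : (Char × Int) → (Char × Int) → Bool) (x : Char × Int) :
    PySem.List.insertBy b x [] = [x] := rfl

theorem insertBy_cons' (b : (Char × Int) → (Char × Int) → Bool) (x y : Char × Int) (ys : List (Char × Int)) :
    PySem.List.insertBy b x (y :: ys) =
      if b x y then x :: y :: ys else y :: PySem.List.insertBy b x ys := rfl

theorem bef_asymm {a b : Char × Int} (h : bef a b = true) : bef b a = false := by
  rw [Bool.eq_false_iff]
  intro h'
  exact ltp_asymm ((bef_iff a b).1 h) ((bef_iff b a).1 h')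

theorem insertBy_pairwise (x : Char × Int) (ys : List (Char × Int))
    (h : ys.Pairwise (fun a b => bef b a = false)) :
    (PySem.List.insertBy bef x ys).Pairwise (fun a b => bef b a = false) := by
  induction ys with
  | nil => simp [insertBy_nil']
  | cons y ys ih =>
    rw [insertBy_cons']
    rcases List.pairwise_cons.1 h with ⟨hy, hys⟩
    by_cases hb : bef x y = true
    · rw [if_pos hb]
      refine List.pairwise_cons.2 ⟨?_, h⟩
      intro z hz
      rcases List.mem_cons.1 hz with rfl | hz
      · exact bef_asymm hb
      · rw [Bool.eq_false_iff]
        intro hzx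
        have h1 := (bef_iff z x).1 hzx
        have h2 := (bef_iff x y).1 hb
        have := hy z hz
        rw [Bool.eq_false_iff] at this
        exact this ((bef_iff z y).2 (ltp_trans h1 h2))
    · rw [if_neg hb]
      refine List.pairwise_cons.2 ⟨?_, ih hys⟩
      intro z hz
      rw [PySem.List.mem_insertBy] at hz
      rcases hz with rfl | hz
      · exact Bool.eq_false_iff.2 hb
      · exact hy z hz

theorem foldl_insertBy_pairwise (xs : List (Char × Int)) :
    ∀ acc : List (Char × Int), acc.Pairwise (fun a b => bef b a = false) →
    (xs.foldl (fun acc x => PySem.List.insertBy bef x acc) acc).Pairwise (fun a b => bef b a = false) := by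
  induction xs with
  | nil => intro acc h; exact h
  | cons x xs ih => intro acc h; exact ih _ (insertBy_pairwise x acc h)

theorem sorted2_eq_foldl (xs : List (Char × Int)) :
    PySem.List.sorted2 xs (fun t => t.1) (fun t => t.2) =
      xs.foldl (fun acc x => PySem.List.insertBy bef x acc) [] := rfl

theorem sorted2_pairwise_ltp (xs : List (Char × Int)) (hnd : xs.Nodup) :
    (PySem.List.sorted2 xs (fun t => t.1) (fun t => t.2)).Pairwise ltp := by
  have hR : (PySem.List.sorted2 xs (fun t => t.1) (fun t => t.2)).Pairwise
      (fun a b => bef b a = false) := by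
    rw [sorted2_eq_foldl]
    exact foldl_insertBy_pairwise xs [] (List.Pairwise.nil)
  have hperm : (PySem.List.sorted2 xs (fun t => t.1) (fun t => t.2)).Perm xs :=
    PySem.List.sorted2_perm xs _ _ _
  have hnd' : (PySem.List.sorted2 xs (fun t => t.1) (fun t => t.2)).Nodup :=
    (hperm.nodup_iff).2 hnd
  have := hR.and hnd'
  refine this.imp ?_
  rintro a b ⟨h1, h2⟩
  rcases ltp_trichotomy h2 with h | h
  · exact h
  · exact absurd ((bef_iff b a).2 h) (by simp [h1])

theorem countP_lt_getElem (s : List (Char × Int)) (hp : s.Pairwise ltp)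
    (p : Nat) (hple : p < s.length) :
    s.countP (fun q => decide (ltp q s[p])) = p := by
  have hsplit : s = s.take p ++ s[p] :: s.drop (p + 1) := by
    rw [List.getElem_cons_drop, List.take_append_drop]
  have hge := List.pairwise_iff_getElem.1 hp
  obtain ⟨x, hx⟩ : ∃ x, s[p] = x := ⟨s[p], rfl⟩
  rw [hx]
  conv_lhs => rw [hsplit, hx]
  rw [List.countP_append, List.countP_cons]
  have h1 : (s.take p).countP (fun q => decide (ltp q x)) = (s.take p).length := by
    apply List.countP_eq_length.2
    intro a ha
    rw [List.mem_take_iff_getElem] at ha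
    obtain ⟨i, hi, rfl⟩ := ha
    have hip : i < p := by omega
    exact decide_eq_true (hx ▸ hge i p (by omega) hple hip)
  have h2 : (s.drop (p + 1)).countP (fun q => decide (ltp q x)) = 0 := by
    apply List.countP_eq_zero.2
    intro a ha
    rw [List.mem_drop_iff_getElem] at ha
    obtain ⟨i, hi, rfl⟩ := ha
    simp only [decide_eq_true_eq]
    exact ltp_asymm (hx ▸ hge p (p + 1 + i) hple (by omega) (by omega))
  rw [h1, h2, List.length_take]
  simp [decide_eq_false (ltp_irrefl x)]
  omega

theorem length_foldl_pySetD (ws : List (Int × Int)) (arr : List Int) :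
    (ws.foldl (fun a w => PySem.List.pySetD a w.1 w.2) arr).length = arr.length := by
  induction ws generalizing arr with
  | nil => rfl
  | cons w ws ih => rw [List.foldl_cons, ih, PySem.List.length_pySetD]

theorem foldl_pySetD_getElem?_not_mem (ws : List (Int × Int)) (arr : List Int) (j : Nat)
    (hj : (j : Int) ∉ ws.map Prod.fst) (hpos : ∀ w ∈ ws, 0 ≤ w.1) :
    (ws.foldl (fun a w => PySem.List.pySetD a w.1 w.2) arr)[j]? = arr[j]? := by
  induction ws generalizing arr with
  | nil => rfl
  | cons w ws ih =>
    rw [List.foldl_cons, ih _ (fun h => hj (by simp only [List.map_cons, List.mem_cons]; exact Or.inr h)) (fun w hw => hpos w (List.mem_cons_of_mem _ hw))]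
    rw [PySem.List.pySetD_of_nonneg (h := hpos w (List.mem_cons.2 (Or.inl rfl)))]
    apply List.getElem?_set_ne
    intro h
    apply hj
    have h0 := hpos w (List.mem_cons.2 (Or.inl rfl))
    simp only [List.map_cons, List.mem_cons]
    left
    omega

theorem foldl_pySetD_getElem?_mem (ws : List (Int × Int)) (arr : List Int) (j : Nat) (v : Int)
    (hmem : ((j : Int), v) ∈ ws) (hnd : (ws.map Prod.fst).Nodup)
    (hrange : ∀ w ∈ ws, 0 ≤ w.1 ∧ w.1 < arr.length) :
    (ws.foldl (fun a w => PySem.List.pySetD a w.1 w.2) arr)[j]? = some v := by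
  induction ws generalizing arr with
  | nil => exact absurd hmem (List.not_mem_nil)
  | cons w ws ih =>
    rw [List.foldl_cons]
    rcases List.mem_cons.1 hmem with heq | hmem'
    · subst heq
      have hj : (j : Int) ∉ ws.map Prod.fst := by
        rw [List.map_cons, List.nodup_cons] at hnd
        exact hnd.1
      rw [foldl_pySetD_getElem?_not_mem ws _ j hj
        (fun w hw => (hrange w (List.mem_cons_of_mem _ hw)).1)]
      have hlt : j < arr.length := by
        have := (hrange _ (List.mem_cons.2 (Or.inl rfl))).2
        omega
      rw [show ((j : Int), v).1 = ((j : Nat) : Int) from rfl, PySem.List.pySetD_natCast]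
      simp [hlt]
    · rw [List.map_cons, List.nodup_cons] at hnd
      apply ih _ hmem' hnd.2
      intro w' hw'
      rw [PySem.List.length_pySetD]
      exact hrange w' (List.mem_cons_of_mem _ hw')

theorem foldA_fst (l : List (Char × Int)) :
    ∀ (s0 : Int) (arr : List Int) (lc : Option Char),
    ((PySem.List.enumerate l s0).foldl
      (fun st q =>
        let last_num := if some q.2.1 = st.2.1 then st.2.2 + 1 else q.1 + 1
        (PySem.List.pySetD st.1 q.2.2 last_num, some q.2.1, last_num))
      (arr, lc, s0)).1
    = (PySem.List.enumerate l s0).foldl (fun a q => PySem.List.pySetD a q.2.2 (q.1 + 1)) arr := by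
  induction l with
  | nil => intro s0 arr lc; rfl
  | cons x l ih =>
    intro s0 arr lc
    rw [PySem.List.enumerate_cons, List.foldl_cons, List.foldl_cons]
    simp only [ite_self]
    exact ih (s0 + 1) _ _

theorem core (ks : List Char) :
    ((PySem.List.enumerate (PySem.List.sorted2
      ((PySem.List.enumerate ks).map (fun p => (p.2, p.1))) (fun t => t.1) (fun t => t.2))).map
        (fun q => (q.2.2, q.1 + 1))).foldl (fun a w => PySem.List.pySetD a w.1 w.2)
        (List.replicate ks.length (0 : Int))
    = (PySem.List.enumerate ks).map
      (fun jc => 1 + ((PySem.List.enumerate ks).countP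
        (fun ic => decide (ic.2 < jc.2 ∨ (ic.2 = jc.2 ∧ ic.1 < jc.1))) : Int)) := by
  set pairs := (PySem.List.enumerate ks).map (fun p : Int × Char => (p.2, p.1)) with hpairsdef
  set s := PySem.List.sorted2 pairs (fun t => t.1) (fun t => t.2) with hsdef
  set ws := (PySem.List.enumerate s).map (fun q : Int × (Char × Int) => (q.2.2, q.1 + 1)) with hwsdef
  have hperm : s.Perm pairs := PySem.List.sorted2_perm pairs _ _ _
  have hsnd : pairs.map Prod.snd = PySem.List.pyRange 0 (0 + (ks.length : Int)) 1 := by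
    rw [hpairsdef, List.map_map]
    exact PySem.List.map_fst_enumerate ks 0
  have hnd_pairs : pairs.Nodup :=
    List.Nodup.of_map (f := Prod.snd) (by rw [hsnd]; exact PySem.List.nodup_pyRange_one _ _)
  have hpltp : s.Pairwise ltp := sorted2_pairwise_ltp pairs hnd_pairs
  have hmem_pairs : ∀ x ∈ pairs, ∃ (k : Nat) (hk : k < ks.length), x = (ks[k], (k : Int)) := by
    intro x hx
    rw [hpairsdef, List.mem_map] at hx
    obtain ⟨p, hp, rfl⟩ := hx
    rw [PySem.List.mem_enumerate_iff] at hp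
    obtain ⟨k, hk, rfl⟩ := hp
    exact ⟨k, hk, by simp⟩
  have hws_fst : ws.map Prod.fst = s.map Prod.snd := by
    rw [hwsdef, List.map_map]
    rw [show (Prod.fst ∘ fun q : Int × (Char × Int) => (q.2.2, q.1 + 1)) = Prod.snd ∘ Prod.snd from rfl]
    rw [← List.map_map, PySem.List.map_snd_enumerate]
  have hnd_ws : (ws.map Prod.fst).Nodup := by
    rw [hws_fst]
    exact ((hperm.map Prod.snd).nodup_iff).2 (by rw [hsnd]; exact PySem.List.nodup_pyRange_one _ _)
  have hrange : ∀ w ∈ ws, 0 ≤ w.1 ∧ w.1 < (List.replicate ks.length (0 : Int)).length := by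
    intro w hw
    rw [hwsdef, List.mem_map] at hw
    obtain ⟨q, hq, rfl⟩ := hw
    rw [PySem.List.mem_enumerate_iff] at hq
    obtain ⟨p, hp, rfl⟩ := hq
    obtain ⟨k, hk, heq⟩ := hmem_pairs s[p] (hperm.subset (List.getElem_mem hp))
    rw [heq]
    simp only [List.length_replicate]
    constructor
    · positivity
    · exact_mod_cast hk
  have hlen1 : (ws.foldl (fun a w => PySem.List.pySetD a w.1 w.2)
      (List.replicate ks.length (0 : Int))).length = ks.length := by
    rw [length_foldl_pySetD, List.length_replicate]
  apply List.ext_getElem?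
  intro j
  by_cases hj : j < ks.length
  · -- locate the pair (ks[j], j) in s
    have hjmem : ((j : Int)) ∈ s.map Prod.snd := by
      rw [(hperm.map Prod.snd).mem_iff, hsnd, PySem.List.mem_pyRange_one]
      constructor
      · positivity
      · omega
    obtain ⟨q, hqs, hq2⟩ := List.mem_map.1 hjmem
    obtain ⟨k, hk, hqe⟩ := hmem_pairs q (hperm.subset hqs)
    have hkj : k = j := by
      have : ((k : Int)) = (j : Int) := by rw [hqe] at hq2; exact hq2
      exact_mod_cast this
    simp only [hkj] at hqe
    obtain ⟨p, hps, hsp⟩ := List.getElem_of_mem hqs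
    have hwmem : ((j : Int), (p : Int) + 1) ∈ ws := by
      rw [hwsdef, List.mem_map]
      refine ⟨(0 + (p : Int), s[p]), ?_, ?_⟩
      · rw [PySem.List.mem_enumerate_iff]; exact ⟨p, hps, rfl⟩
      · rw [hsp, hqe]; simp
    rw [foldl_pySetD_getElem?_mem ws _ j _ hwmem hnd_ws hrange]
    rw [List.getElem?_map, PySem.List.getElem?_enumerate,
      List.getElem?_eq_getElem hj]
    simp only [Option.map_some, Option.some.injEq]
    have hp_eq : s.countP (fun q' => decide (ltp q' s[p])) = p :=
      countP_lt_getElem s hpltp p hps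
    rw [hperm.countP_eq, hsp, hqe] at hp_eq
    have hcnt2 : pairs.countP (fun q' => decide (ltp q' (ks[j], (j : Int))))
        = (PySem.List.enumerate ks).countP
          (fun ic => decide (ic.2 < ks[j] ∨ (ic.2 = ks[j] ∧ ic.1 < 0 + (j : Int)))) := by
      rw [hpairsdef, List.countP_map]
      apply List.countP_congr
      intro ic _
      simp [ltp]
    rw [hcnt2] at hp_eq
    rw [← hp_eq]
    omega
  · rw [List.getElem?_eq_none (by rw [hlen1]; omega),
      List.getElem?_eq_none (by rw [List.length_map, PySem.List.length_enumerate]; omega)]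

-- ----- B-side lemmas -----

-- split the lexicographic count: chars strictly smaller anywhere, plus equal chars earlier
theorem cnt_split (c : Char) : ∀ (ks : List Char) (s j : Int),
    (PySem.List.enumerate ks s).countP
      (fun ic => decide (ic.2 < c ∨ (ic.2 = c ∧ ic.1 < j)))
    = ks.countP (fun x => decide (x < c)) + (ks.take (j - s).toNat).count c := by
  intro ks
  induction ks with
  | nil => intro s j; simp
  | cons x ks ih =>
    intro s j
    rw [PySem.List.enumerate_cons, List.countP_cons, List.countP_cons, ih (s + 1) j]
    by_cases hsj : s < j
    · have h1 : (j - s).toNat = (j - (s + 1)).toNat + 1 := by omega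
      rw [h1, List.take_succ_cons, List.count_cons]
      by_cases hxc : x = c
      · subst hxc
        simp [hsj]
        omega
      · by_cases hlt : x < c
        · simp [hlt, hxc]
          omega
        · simp [hlt, hxc]
    · have h1 : (j - s).toNat = 0 := by omega
      have h2 : (j - (s + 1)).toNat = 0 := by omega
      rw [h1, h2, List.take_zero]
      by_cases hlt : x < c
      · simp [hlt, hsj]
      · by_cases hxc : x = c <;> simp [hlt, hxc, hsj]

-- a fold that never inserts key c leaves c's entry alone
theorem offsets_fold_not_mem (f : Char → Int) (c : Char) :
    ∀ (l : List Char) (d : PySem.Dict Char Int) (t : Int), c ∉ l →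
    ((l.foldl (fun st x => (st.1.insert x st.2, st.2 + f x)) (d, t)).1).getD c 0 = d.getD c 0 := by
  intro l
  induction l with
  | nil => intro d t _; rfl
  | cons x l ih =>
    intro d t hc
    rw [List.foldl_cons]
    rw [ih _ _ (fun h => hc (List.mem_cons_of_mem _ h))]
    exact PySem.Dict.getD_insert_of_ne _ _ _ (fun h => hc (h ▸ List.mem_cons.2 (Or.inl rfl)))

-- the prefix-sum fold: each key of the strictly increasing list gets the running total
theorem offsets_fold (f : Char → Int) :
    ∀ (l : List Char), l.Pairwise (· < ·) →
    ∀ (d : PySem.Dict Char Int) (t : Int) (c : Char), c ∈ l →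
    ((l.foldl (fun st x => (st.1.insert x st.2, st.2 + f x)) (d, t)).1).getD c 0
      = t + ((l.takeWhile (fun x => decide (x < c))).map f).sum := by
  intro l
  induction l with
  | nil => intro _ d t c hc; exact absurd hc (List.not_mem_nil)
  | cons x l ih =>
    intro hp d t c hc
    rcases List.pairwise_cons.1 hp with ⟨hx, hl⟩
    rw [List.foldl_cons]
    rcases List.mem_cons.1 hc with rfl | hcl
    · have hnx : c ∉ l := fun h => absurd (hx c h) (lt_irrefl c)
      rw [offsets_fold_not_mem f c l _ _ hnx, PySem.Dict.getD_insert_self]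
      have : (c :: l).takeWhile (fun y => decide (y < c)) = [] := by
        rw [List.takeWhile_cons_of_neg (by simp)]
      rw [this]
      simp
    · have hxc : x < c := hx c hcl
      rw [ih hl _ _ c hcl, List.takeWhile_cons_of_pos (by simpa using hxc)]
      simp
      omega

-- in a strictly increasing list, takeWhile (< c) is filter (< c)
theorem takeWhile_eq_filter_of_sorted (c : Char) :
    ∀ (l : List Char), l.Pairwise (· < ·) →
    l.takeWhile (fun x => decide (x < c)) = l.filter (fun x => decide (x < c)) := by
  intro l
  induction l with
  | nil => intro _; rfl
  | cons x l ih =>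
    intro hp
    rcases List.pairwise_cons.1 hp with ⟨hx, hl⟩
    by_cases hxc : x < c
    · rw [List.takeWhile_cons_of_pos (by simpa using hxc),
        List.filter_cons_of_pos (by simpa using hxc), ih hl]
    · rw [List.takeWhile_cons_of_neg (by simpa using hxc),
        List.filter_cons_of_neg (by simpa using hxc)]
      symm
      rw [List.filter_eq_nil_iff]
      intro y hy
      simp only [decide_eq_true_eq]
      intro hyc
      exact hxc (lt_trans (hx y hy) hyc)

-- summing the multiplicities of the distinct characters below c counts them all
theorem sum_count_filter (p : Char → Bool) (D : List Char) (hnd : D.Nodup) :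
    ∀ (ks : List Char), (∀ x ∈ ks, x ∈ D) →
    ((D.filter p).map (fun x => (ks.count x : Int))).sum = (ks.countP p : Int) := by
  intro ks
  induction ks with
  | nil => intro _; simp
  | cons a ks ih =>
    intro hsub
    have hmap : ((D.filter p).map (fun x => ((a :: ks).count x : Int)))
        = ((D.filter p).map (fun x => (ks.count x : Int)
            + (if decide (x = a) = true then 1 else 0))) := by
      apply List.map_congr_left
      intro x _
      rw [List.count_cons]
      by_cases hxa : x = a
      · simp [hxa]
      · simp [hxa, Ne.symm hxa]
    rw [hmap, PySem.List.sum_map_add_int, ih (fun x hx => hsub x (List.mem_cons_of_mem _ hx))]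
    rw [PySem.List.sum_map_ite_one_zero (fun x => decide (x = a))]
    have hc : (D.filter p).countP (fun x => decide (x = a)) = if p a then 1 else 0 := by
      have he : (D.filter p).countP (fun x => decide (x = a)) = (D.filter p).count a := by
        rw [List.count]
        apply List.countP_congr
        intro x _
        rw [show ((x == a) = decide (x = a)) from rfl]
      rw [he]
      by_cases hpa : p a = true
      · rw [List.count_eq_one_of_mem (hnd.filter p)
          (List.mem_filter.2 ⟨hsub a (List.mem_cons.2 (Or.inl rfl)), hpa⟩), if_pos hpa]
      · rw [List.count_eq_zero.2 (fun h => hpa (List.mem_filter.1 h).2), if_neg hpa]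
    rw [hc, List.countP_cons]
    by_cases hpa : p a = true <;> simp [hpa]

-- the emitting fold: each position yields its base offset plus its running occurrence count
theorem final_fold (base : Char → Int) (ks : List Char) :
    ∀ (suffix : List Char) (m : Nat), suffix = ks.drop m →
    ∀ (o : PySem.Dict Char Int) (out : List Int),
    (∀ c ∈ suffix, o.getD c 0 = base c + ((ks.take m).count c : Int)) →
    (suffix.foldl (fun st c =>
        let v := st.1.getD c 0 + 1
        (st.1.insert c v, st.2 ++ [v])) (o, out)).2
    = out ++ (PySem.List.enumerate suffix (m : Int)).map
        (fun jc => base jc.2 + ((ks.take jc.1.toNat).count jc.2 : Int) + 1) := by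
  intro suffix
  induction suffix with
  | nil => intro m _ o out _; simp
  | cons c rest ih =>
    intro m hdrop o out ho
    have hm' : m < ks.length := by
      by_contra h
      rw [List.drop_eq_nil_iff.2 (by omega)] at hdrop
      exact List.cons_ne_nil _ _ hdrop
    have hcons : ks[m] :: ks.drop (m + 1) = c :: rest := by
      rw [← List.drop_eq_getElem_cons, ← hdrop]
    have hksm : ks[m] = c := (List.cons.injEq _ _ _ _ ▸ hcons).1
    have hrest : rest = ks.drop (m + 1) := ((List.cons.injEq _ _ _ _ ▸ hcons).2).symm
    rw [List.foldl_cons, PySem.List.enumerate_cons]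
    have htake : ks.take (m + 1) = ks.take m ++ [c] := by
      rw [List.take_add_one, List.getElem?_eq_getElem hm', hksm]
      rfl
    have hval : o.getD c 0 + 1
        = base c + ((ks.take ((m : Int).toNat)).count c : Int) + 1 := by
      rw [ho c (List.mem_cons.2 (Or.inl rfl))]
      simp
    have hpush : (m : Int) + 1 = ((m + 1 : Nat) : Int) := by push_cast; ring
    have hinv : ∀ c' ∈ rest, ((o.insert c (o.getD c 0 + 1)).getD c' 0)
        = base c' + ((ks.take (m + 1)).count c' : Int) := by
      intro c' hc'
      by_cases hcc : c' = c
      · subst hcc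
        rw [PySem.Dict.getD_insert_self, htake, ho c' (List.mem_cons.2 (Or.inl rfl)),
          List.count_append]
        push_cast
        simp
        ring
      · rw [PySem.Dict.getD_insert_of_ne _ _ _ hcc, htake, List.count_append]
        have hz : [c].count c' = 0 := by
          simp [Ne.symm hcc]
        rw [hz]
        simp only [Nat.add_zero]
        exact ho c' (List.mem_cons_of_mem _ hc')
    simp only []
    rw [hpush, ih (m + 1) hrest _ _ hinv, List.map_cons, ← List.append_cons, hval]

theorem alt_eq_map (key : String) :
    generate_numeric_key_alt key = (PySem.List.enumerate key.toList).map
      (fun jc => (key.toList.countP (fun x => decide (x < jc.2)) : Int)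
        + ((key.toList.take jc.1.toNat).count jc.2 : Int) + 1) := by
  set ks := key.toList with hks
  show ((ks.foldl _ (_, ([] : List Int)))).2 = _
  set counts := ks.foldl (fun d c => d.insert c (d.getD c 0 + 1))
    (PySem.Dict.empty : PySem.Dict Char Int) with hcountsdef
  have hcounts : ∀ c, counts.getD c 0 = (ks.count c : Int) := by
    intro c
    rw [hcountsdef, PySem.Dict.getD_foldl_insert_add_one]
    simp
  have hkeys : counts.keys = PySem.Set.ofList ks := by
    rw [hcountsdef, PySem.Dict.keys_foldl_insert]
    rfl
  set sk := PySem.List.sorted counts.keys (fun c => c) with hskdef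
  have hsk_pair : sk.Pairwise (· < ·) := by
    rw [hskdef, hkeys]
    exact PySem.List.sorted_ofList_pairwise_lt ks
  have hsk_nodup : sk.Nodup := hsk_pair.imp (fun h => ne_of_lt h)
  have hsk_mem : ∀ x, x ∈ sk ↔ x ∈ ks := by
    intro x
    rw [hskdef, hkeys, PySem.List.mem_sorted, PySem.Set.mem_ofList]
  have ho : ∀ c ∈ ks,
      ((sk.foldl (fun (st : PySem.Dict Char Int × Int) c =>
          (st.1.insert c st.2, st.2 + counts.getD c 0))
        (PySem.Dict.empty, 0)).1).getD c 0
      = (ks.countP (fun x => decide (x < c)) : Int) := by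
    intro c hc
    rw [offsets_fold (fun x => counts.getD x 0) sk hsk_pair _ _ c ((hsk_mem c).2 hc)]
    rw [takeWhile_eq_filter_of_sorted c sk hsk_pair]
    have hmapc : ((sk.filter (fun x => decide (x < c))).map (fun x => counts.getD x 0))
        = ((sk.filter (fun x => decide (x < c))).map (fun x => (ks.count x : Int))) :=
      List.map_congr_left (fun x _ => hcounts x)
    rw [hmapc, sum_count_filter (fun x => decide (x < c)) sk hsk_nodup ks
      (fun x hx => (hsk_mem x).2 hx)]
    simp
  rw [final_fold (fun c => (ks.countP (fun x => decide (x < c)) : Int)) ks ks 0 rfl _ []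
    (by intro c hc; rw [ho c hc]; simp)]
  simp

theorem main (key : String) : generate_numeric_key key = generate_numeric_key_alt key := by
  have hlenrep : PySem.List.pyRepeat [(0:Int)] (PySem.Str.len key)
      = List.replicate key.toList.length (0:Int) := by
    rw [PySem.List.pyRepeat_singleton]
    simp [PySem.Str.len_eq]
  have hA : generate_numeric_key key = ((PySem.List.enumerate (PySem.List.sorted2
      ((PySem.List.enumerate key.toList).map (fun p => (p.2, p.1))) (fun t => t.1) (fun t => t.2))).map
        (fun q => (q.2.2, q.1 + 1))).foldl (fun a w => PySem.List.pySetD a w.1 w.2)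
        (List.replicate key.toList.length (0 : Int)) := by
    show ((PySem.List.enumerate _).foldl _ (PySem.List.pyRepeat [(0:Int)] (PySem.Str.len key), (none : Option Char), (0:Int))).1 = _
    rw [hlenrep, foldA_fst, List.foldl_map]
  rw [hA, core key.toList, alt_eq_map key]
  apply List.map_congr_left
  intro jc hjc
  rw [PySem.List.mem_enumerate_iff] at hjc
  obtain ⟨k, hk, rfl⟩ := hjc
  simp only
  have h1 : ((0 : Int) + (k : Int) - 0).toNat = k := by omega
  have h2 : ((0 : Int) + (k : Int)).toNat = k := by omega
  rw [cnt_split key.toList[k] key.toList 0 (0 + (k : Int)), h1, h2]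
  push_cast
  ring

-- ===== VERDICT (by name: the statement is the Claim_ definition above) =====
theorem generate_numeric_key_spec : Claim_equal_generate_numeric_key := by
  intro key _
  unfold Spec_generate_numeric_key
  exact main key
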